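-- pv_equiv track=rewrite | github.com/pe2mbs/webapp2 | tests/test_finger.py | _getAttrbute
-- ===== SOURCE A (Python) =====
-- def _getAttrbute( buffer, attribute ):
--     position = buffer.find( attribute )
--     if position < 0:
--         return ''
--     position += len( attribute )
--     value = ''
--     lastCh = ''
--     while position < len( buffer ) and buffer[ position ] >= ' ' and not ( buffer[ position ] == ' ' and lastCh == ' ' ):
--         lastCh = buffer[ position ]
--         position += 1
--         value += lastCh
--
--     return value.strip()
-- ===== SOURCE B (Python) =====
-- def _until_control(s):
--     # longest prefix of s containing no control character (ord < 32)
--     for i, ch in enumerate(s):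
--         if ch < ' ':
--             return s[:i]
--     return s
--
--
-- def _getAttrbute(buffer, attribute):
--     position = buffer.find(attribute)
--     if position < 0:
--         return ''
--     position += len(attribute)
--     ds = buffer.find('  ', position)
--     end = ds + 1 if ds >= 0 else len(buffer)
--     return _until_control(buffer[position:end]).strip()
-- ===== Notes on version B (the rewrite author's own statement) =====
-- stated objective: simpler
-- what changed: Replaces A's stateful lastCh/value character-accumulation loop with two boundary searches (find(' ', position) for the double-space stop, a scan for the first control character) and a single slice+strip.
import Mathlib
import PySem

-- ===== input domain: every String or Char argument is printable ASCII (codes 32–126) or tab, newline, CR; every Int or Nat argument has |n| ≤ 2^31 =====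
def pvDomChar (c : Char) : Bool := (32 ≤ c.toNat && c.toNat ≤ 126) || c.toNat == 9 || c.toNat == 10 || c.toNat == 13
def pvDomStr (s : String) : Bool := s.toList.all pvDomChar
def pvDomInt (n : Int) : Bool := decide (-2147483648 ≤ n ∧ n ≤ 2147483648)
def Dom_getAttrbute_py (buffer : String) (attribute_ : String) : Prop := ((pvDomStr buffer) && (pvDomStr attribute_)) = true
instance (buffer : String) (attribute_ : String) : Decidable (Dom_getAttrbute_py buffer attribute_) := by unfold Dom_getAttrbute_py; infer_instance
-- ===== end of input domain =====

-- B replaces A's stateful character-accumulation loop (lastCh/value) by two boundary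
-- searches — find('  ', position) for the double-space stop and a control-character cut —
-- plus a single slice; same return value, different decomposition (objective: simpler).

-- ===== PORT A =====
-- A's while loop over buffer[position:]; lastCh is Option Char (none = the initial '').
def pvLoopA : List Char → Option Char → List Char
  | [], _ => []
  | c :: rest, last =>
    if 32 ≤ c.toNat ∧ ¬(c = ' ' ∧ last = some ' ') then
      c :: pvLoopA rest (some c)
    else []

def getAttrbute_py (buffer : String) (attribute_ : String) : String :=
  if PySem.Chars.find buffer.toList attribute_.toList < 0 then ""
  else
    String.ofList (PySem.Chars.strip
      (pvLoopA (buffer.toList.drop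
        ((PySem.Chars.find buffer.toList attribute_.toList).toNat + attribute_.toList.length)) none))

-- ===== PORT B =====
-- Source B's _until_control: longest prefix without a control character (ord < 32)
def pvUntilControl : List Char → List Char
  | [] => []
  | c :: rest => if c.toNat < 32 then [] else c :: pvUntilControl rest

-- Source B's tail after the find/guard: end from find('  ', position), slice, cut, strip
def pvValueSlice (bl : List Char) (pos : Int) : String :=
  String.ofList (PySem.Chars.strip
    (pvUntilControl (PySem.List.slice bl (some pos)
      (some (if 0 ≤ PySem.Chars.findFrom bl [' ', ' '] pos
             then PySem.Chars.findFrom bl [' ', ' '] pos + 1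
             else (bl.length : Int))))))

def getAttrbute_py_alt (buffer : String) (attribute_ : String) : String :=
  if PySem.Chars.find buffer.toList attribute_.toList < 0 then ""
  else
    pvValueSlice buffer.toList
      (PySem.Chars.find buffer.toList attribute_.toList + (attribute_.toList.length : Int))

-- ===== PRECONDITION & SPEC =====
def Spec_getAttrbute_py (buffer : String) (attribute_ : String) (out : String) : Prop := out = getAttrbute_py_alt buffer attribute_
instance (buffer : String) (attribute_ : String) (out : String) : Decidable (Spec_getAttrbute_py buffer attribute_ out) := by unfold Spec_getAttrbute_py; infer_instance

-- ===== CLAIM (what is proved, stated in full; the proofs are below) =====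
def Claim_equal_getAttrbute_py : Prop := ∀ (buffer : String) (attribute_ : String), Dom_getAttrbute_py buffer attribute_ → Spec_getAttrbute_py buffer attribute_ (getAttrbute_py buffer attribute_)

-- ===== LEMMAS AND PROOFS =====

-- index of the first j with l[j] = l[j+1] = ' ' (the double-space stop), if any
def pvDS : List Char → Option Nat
  | [] => none
  | [_] => none
  | c :: d :: r => if c = ' ' ∧ d = ' ' then some 0 else (pvDS (d :: r)).map (· + 1)

-- end of the value: one past the first space of the first double space, else the length
def pvE (l : List Char) : Nat :=
  match pvDS l with
  | some j => j + 1
  | none => l.length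

theorem pvLoopA_cons (c : Char) (r : List Char) (last : Option Char) :
    pvLoopA (c :: r) last =
      if 32 ≤ c.toNat ∧ ¬(c = ' ' ∧ last = some ' ') then c :: pvLoopA r (some c) else [] := rfl

theorem pvUntilControl_cons (c : Char) (r : List Char) :
    pvUntilControl (c :: r) = if c.toNat < 32 then [] else c :: pvUntilControl r := rfl

theorem pvDS_cons (c : Char) (r : List Char) :
    pvDS (c :: r) = if c = ' ' ∧ r.head? = some ' ' then some 0 else (pvDS r).map (· + 1) := by
  cases r with
  | nil => simp [pvDS]
  | cons d r' => simp [pvDS]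

theorem pvDS_some_spec (l : List Char) (j : Nat) (h : pvDS l = some j) :
    [' ', ' '] <+: l.drop j ∧ ∀ i < j, ¬ [' ', ' '] <+: l.drop i := by
  induction l generalizing j with
  | nil => simp [pvDS] at h
  | cons c r ih =>
    rw [pvDS_cons] at h
    by_cases hc : c = ' ' ∧ r.head? = some ' '
    · rw [if_pos hc] at h
      cases h
      refine ⟨?_, by omega⟩
      obtain ⟨hc1, hc2⟩ := hc
      cases r with
      | nil => simp at hc2
      | cons d r' =>
        rw [List.head?_cons] at hc2
        injection hc2 with hc2
        subst hc1; subst hc2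
        rw [List.drop_zero]
        exact List.cons_prefix_cons.mpr ⟨rfl, List.cons_prefix_cons.mpr ⟨rfl, List.nil_prefix⟩⟩
    · rw [if_neg hc] at h
      cases hds : pvDS r with
      | none => rw [hds] at h; simp at h
      | some k =>
        rw [hds] at h
        simp only [Option.map_some, Option.some.injEq] at h
        obtain ⟨hp, hmin⟩ := ih k hds
        subst h
        refine ⟨by simpa using hp, ?_⟩
        intro i hi hpre
        cases i with
        | zero =>
          rw [List.drop_zero] at hpre
          cases r with
          | nil =>
            have := hpre.length_le
            simp at this
          | cons d r' =>
            obtain ⟨h1, hpre2⟩ := List.cons_prefix_cons.mp hpre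
            obtain ⟨h2, -⟩ := List.cons_prefix_cons.mp hpre2
            exact hc ⟨h1.symm, by rw [List.head?_cons, ← h2]⟩
        | succ i' => exact hmin i' (by omega) (by simpa using hpre)

theorem pvDS_none_spec (l : List Char) (h : pvDS l = none) :
    ∀ i, ¬ [' ', ' '] <+: l.drop i := by
  induction l with
  | nil => intro i; simp
  | cons c r ih =>
    rw [pvDS_cons] at h
    by_cases hc : c = ' ' ∧ r.head? = some ' '
    · rw [if_pos hc] at h; simp at h
    · rw [if_neg hc] at h
      have hr : pvDS r = none := by
        cases hds : pvDS r with
        | none => rfl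
        | some k => rw [hds] at h; simp at h
      intro i hpre
      cases i with
      | zero =>
        rw [List.drop_zero] at hpre
        cases r with
        | nil =>
          have := hpre.length_le
          simp at this
        | cons d r' =>
          obtain ⟨h1, hpre2⟩ := List.cons_prefix_cons.mp hpre
          obtain ⟨h2, -⟩ := List.cons_prefix_cons.mp hpre2
          exact hc ⟨h1.symm, by rw [List.head?_cons, ← h2]⟩
      | succ i' => exact ih hr i' (by simpa using hpre)

-- pvE agrees with the find('  ')-based end computation of port B
theorem pvE_eq_find (l : List Char) :
    (if PySem.Chars.find l [' ', ' '] = -1 then l.length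
     else (PySem.Chars.find l [' ', ' ']).toNat + 1) = pvE l := by
  cases hds : pvDS l with
  | none =>
    have hno : ¬ [' ', ' '] <:+: l := by
      intro hin
      have h1 : PySem.Chars.isIn [' ', ' '] l = true := (PySem.Chars.isIn_iff_infix _ _).mpr hin
      obtain ⟨j, hj⟩ := (PySem.Chars.exists_prefix_drop_iff_isIn _ _).mpr h1
      exact pvDS_none_spec l hds j hj
    rw [if_pos ((PySem.Chars.find_eq_neg_one_iff _ _).mpr hno)]
    simp [pvE, hds]
  | some j =>
    obtain ⟨hp, hmin⟩ := pvDS_some_spec l j hds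
    have hin : [' ', ' '] <:+: l := by
      rw [← PySem.Chars.isIn_iff_infix, ← PySem.Chars.exists_prefix_drop_iff_isIn]
      exact ⟨j, hp⟩
    have hnn : 0 ≤ PySem.Chars.find l [' ', ' '] := (PySem.Chars.find_nonneg_iff _ _).mpr hin
    obtain ⟨hfp, hfmin⟩ := PySem.Chars.find_spec hnn
    have hne : PySem.Chars.find l [' ', ' '] ≠ -1 := by omega
    rw [if_neg hne]
    have hje : (PySem.Chars.find l [' ', ' ']).toNat = j := by
      by_contra hne2
      rcases Nat.lt_or_ge (PySem.Chars.find l [' ', ' ']).toNat j with h | h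
      · exact hmin _ h hfp
      · exact hfmin j (by omega) hp
    simp [pvE, hds, hje]

theorem pvLoopA_some_of_ne (l : List Char) (c : Char) (hc : c ≠ ' ') :
    pvLoopA l (some c) = pvLoopA l none := by
  cases l with
  | nil => rfl
  | cons d r =>
    rw [pvLoopA_cons, pvLoopA_cons]
    simp [hc]

theorem pvLoopA_head_ne (d : Char) (r : List Char) (last : Option Char) (hd : d ≠ ' ') :
    pvLoopA (d :: r) last = pvLoopA (d :: r) none := by
  rw [pvLoopA_cons, pvLoopA_cons]
  simp [hd]

theorem pvE_pos (c : Char) (r : List Char) : 0 < pvE (c :: r) := by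
  unfold pvE
  rw [pvDS_cons]
  split
  · simp
  · cases hds : pvDS r <;> simp

theorem pvE_cons_of_not (c : Char) (r : List Char) (h : ¬ (c = ' ' ∧ r.head? = some ' ')) :
    pvE (c :: r) = pvE r + 1 := by
  unfold pvE
  rw [pvDS_cons, if_neg h]
  cases hds : pvDS r <;> simp

-- the heart: A's stateful loop equals B's take-to-the-double-space then cut-at-control
theorem pvLoopA_eq (l : List Char) :
    pvLoopA l none = pvUntilControl (l.take (pvE l)) := by
  induction l with
  | nil => rfl
  | cons c r ih =>
    by_cases h32 : 32 ≤ c.toNat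
    · by_cases hc : c = ' '
      · subst hc
        cases r with
        | nil => decide
        | cons d r' =>
          by_cases hd : d = ' '
          · subst hd
            have hE : pvE (' ' :: ' ' :: r') = 1 := by
              unfold pvE; rw [pvDS_cons]; simp
            rw [hE, pvLoopA_cons, if_pos (by decide), pvLoopA_cons, if_neg (by decide)]
            rfl
          · have hE : pvE (' ' :: d :: r') = pvE (d :: r') + 1 :=
              pvE_cons_of_not _ _ (by simp [hd])
            rw [hE, List.take_succ_cons, pvLoopA_cons, if_pos (by decide),
              pvLoopA_head_ne _ _ _ hd, ih, pvUntilControl_cons, if_neg (by decide)]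
      · have hE : pvE (c :: r) = pvE r + 1 :=
          pvE_cons_of_not _ _ (by simp [hc])
        rw [hE, List.take_succ_cons, pvLoopA_cons,
          if_pos ⟨h32, by rintro ⟨h, -⟩; exact hc h⟩,
          pvLoopA_some_of_ne _ _ hc, ih, pvUntilControl_cons, if_neg (by omega)]
    · obtain ⟨k, hk⟩ : ∃ k, pvE (c :: r) = k + 1 :=
        ⟨pvE (c :: r) - 1, by have := pvE_pos c r; omega⟩
      rw [hk, List.take_succ_cons, pvLoopA_cons, if_neg (by rintro ⟨h, -⟩; exact h32 h),
        pvUntilControl_cons, if_pos (by omega)]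

theorem getAttrbute_py_aux (buffer : String) (attribute_ : String) :
    getAttrbute_py buffer attribute_ = getAttrbute_py_alt buffer attribute_ := by
  unfold getAttrbute_py getAttrbute_py_alt pvValueSlice
  by_cases hneg : PySem.Chars.find buffer.toList attribute_.toList < 0
  · rw [if_pos hneg, if_pos hneg]
  · rw [if_neg hneg, if_neg hneg]
    have hnn : 0 ≤ PySem.Chars.find buffer.toList attribute_.toList := by omega
    obtain ⟨hpre, -⟩ := PySem.Chars.find_spec hnn
    have hlen := PySem.Chars.find_le_length buffer.toList attribute_.toList
    have hdlen := hpre.length_le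
    rw [List.length_drop] at hdlen
    have hposlen : (PySem.Chars.find buffer.toList attribute_.toList).toNat
        + attribute_.toList.length ≤ buffer.toList.length := by omega
    have hcast : PySem.Chars.find buffer.toList attribute_.toList + (attribute_.toList.length : Int)
        = (((PySem.Chars.find buffer.toList attribute_.toList).toNat
            + attribute_.toList.length : Nat) : Int) := by
      push_cast; omega
    rw [hcast, PySem.Chars.findFrom_natCast _ _ _ hposlen]
    set P := (PySem.Chars.find buffer.toList attribute_.toList).toNat + attribute_.toList.length with hP
    by_cases hf : PySem.Chars.find (List.drop P buffer.toList) [' ', ' '] = -1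
    · rw [if_pos hf, if_neg (by norm_num : ¬ (0 : Int) ≤ -1)]
      rw [PySem.List.slice_natCast]
      have hE : pvE (List.drop P buffer.toList) = (List.drop P buffer.toList).length := by
        rw [← pvE_eq_find, if_pos hf]
      rw [pvLoopA_eq, hE, List.length_drop,
        show List.take (buffer.toList.length - P) (List.drop P buffer.toList)
            = List.drop P buffer.toList from by
          rw [← List.length_drop, List.take_length]]
    · have hfnn : 0 ≤ PySem.Chars.find (List.drop P buffer.toList) [' ', ' '] := by
        have := PySem.Chars.neg_one_le_find (List.drop P buffer.toList) [' ', ' ']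
        omega
      rw [if_neg hf, if_pos (by omega)]
      have hcast2 : (P : Int) + PySem.Chars.find (List.drop P buffer.toList) [' ', ' '] + 1
          = ((P + ((PySem.Chars.find (List.drop P buffer.toList) [' ', ' ']).toNat + 1) : Nat) : Int) := by
        push_cast; omega
      rw [hcast2, PySem.List.slice_natCast]
      have hE : pvE (List.drop P buffer.toList)
          = (PySem.Chars.find (List.drop P buffer.toList) [' ', ' ']).toNat + 1 := by
        rw [← pvE_eq_find, if_neg hf]
      rw [pvLoopA_eq, hE,
        show P + ((PySem.Chars.find (List.drop P buffer.toList) [' ', ' ']).toNat + 1) - P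
            = (PySem.Chars.find (List.drop P buffer.toList) [' ', ' ']).toNat + 1 from by omega]

-- ===== VERDICT (by name: the statement is the Claim_ definition above) =====
theorem getAttrbute_py_spec : Claim_equal_getAttrbute_py := by
  intro buffer attribute_ _
  unfold Spec_getAttrbute_py
  exact getAttrbute_py_aux buffer attribute_
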